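-- pv_equiv track=rewrite | github.com/megalodon-chess/hammerhead | src/analyze.py | nodes_text
-- ===== SOURCE A (Python) =====
-- def nodes_text(num):
--     if num < 10**5:
--         suffix = ""
--     elif 10**5 <= num < 10**8:
--         suffix = "k"
--         num = int(num/10**3)
--     elif 10**8 <= num:
--         suffix = "m"
--         num = int(num/10**6)
--     string = suffix
--     count = 0
--     for digit in reversed(str(num)):
--         string = digit + string
--         if count % 3 == 2:
--             string = "," + string
--         count += 1
--     if string.startswith(","):
--         string = string[1:]
--     return string
-- ===== SOURCE B (Python) =====
-- def nodes_text(num):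
--     if num < 10**5:
--         suffix = ""
--     elif num < 10**8:
--         suffix = "k"
--         num = int(num/10**3)
--     else:
--         suffix = "m"
--         num = int(num/10**6)
--     rev = str(num)[::-1]
--     return ",".join(rev[i:i+3] for i in range(0, len(rev), 3))[::-1] + suffix
-- ===== Notes on version B (the rewrite author's own statement) =====
-- stated objective: simpler
-- what changed: Replaces the character-by-character fold with mod-three comma insertion and the trailing leading-comma strip by slicing the reversed digit string into three-character chunks and joining them with commas, so no counter state and no strip fix-up are needed.
import Mathlib
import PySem

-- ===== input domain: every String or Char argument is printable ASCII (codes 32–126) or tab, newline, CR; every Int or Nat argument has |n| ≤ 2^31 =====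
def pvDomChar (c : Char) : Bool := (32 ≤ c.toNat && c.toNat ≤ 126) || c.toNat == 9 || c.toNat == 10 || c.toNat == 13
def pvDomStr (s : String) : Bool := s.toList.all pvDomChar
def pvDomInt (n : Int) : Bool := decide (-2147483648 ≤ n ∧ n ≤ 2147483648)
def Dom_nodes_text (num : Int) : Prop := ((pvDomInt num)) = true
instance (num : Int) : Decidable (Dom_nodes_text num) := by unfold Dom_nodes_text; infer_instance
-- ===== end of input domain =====

-- B formats by slicing the reversed digit string into three-character chunks and joining with commas,
-- instead of A's counted character fold with a trailing leading-comma strip (objective: simpler).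


-- ===== PORT A =====
-- loop body of A's `for digit in reversed(str(num))`: prepend the digit, prepend a comma
-- after every third character, advance the counter
def nodesStep (st : List Char × Int) (digit : Char) : List Char × Int :=
  let s := digit :: st.1
  let s := if PySem.Int.mod st.2 3 = 2 then ',' :: s else s
  (s, st.2 + 1)

-- `int(num/10**3)` / `int(num/10**6)` are ported as floor division: exact there on Dom, since
-- num is positive in those branches and with |num| ≤ 2^31 the float quotient's rounding error
-- is far below 1, so float truncation equals the integer floor quotient.
def nodes_text (num : Int) : String :=
  let sn : List Char × Int :=
    if num < 10 ^ 5 then ([], num)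
    else if 10 ^ 5 ≤ num ∧ num < 10 ^ 8 then (['k'], PySem.Int.floordiv num (10 ^ 3))
    else if 10 ^ 8 ≤ num then (['m'], PySem.Int.floordiv num (10 ^ 6))
    else ([], num)  -- unreachable: the three Python conditions are exhaustive
  let string := (List.foldl nodesStep (sn.1, 0) ((PySem.Int.toChars sn.2).reverse)).1
  let string := if string.head? = some ',' then string.drop 1 else string
  String.ofList string

-- ===== PORT B =====
def nodes_text_alt (num : Int) : String :=
  let sn : List Char × Int :=
    if num < 10 ^ 5 then ([], num)
    else if num < 10 ^ 8 then (['k'], PySem.Int.floordiv num (10 ^ 3))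
    else (['m'], PySem.Int.floordiv num (10 ^ 6))
  let rev := (PySem.Int.toChars sn.2).reverse
  let chunks := (PySem.List.pyRange 0 (PySem.List.len rev) 3).map
    (fun i => PySem.List.slice rev (some i) (some (i + 3)))
  String.ofList ((List.intercalate [','] chunks).reverse ++ sn.1)

-- ===== PRECONDITION & SPEC =====
def Spec_nodes_text (num : Int) (out : String) : Prop := out = nodes_text_alt num
instance (num : Int) (out : String) : Decidable (Spec_nodes_text num out) := by unfold Spec_nodes_text; infer_instance

-- ===== CLAIM (what is proved, stated in full; the proofs are below) =====
def Claim_equal_nodes_text : Prop := ∀ (num : Int), Dom_nodes_text num → Spec_nodes_text num (nodes_text num)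

-- ===== LEMMAS AND PROOFS =====

-- the string A's loop builds in front of the suffix, described recursively in groups of three
def preA : List Char → List Char
  | [] => []
  | [a] => [a]
  | [a, b] => [b, a]
  | a :: b :: c :: r => preA r ++ [',', c, b, a]

-- front-to-back 3-chunks of a list (what B's range/slice comprehension computes)
def chunks3 {α : Type} : List α → List (List α)
  | [] => []
  | a :: r => (a :: r.take 2) :: chunks3 (r.drop 2)
termination_by l => l.length
decreasing_by simp

lemma foldl_nodesStep (r : List Char) : ∀ (acc : List Char) (c : Int),
    PySem.Int.mod c 3 = 0 →
    List.foldl nodesStep (acc, c) r = (preA r ++ acc, c + r.length) := by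
  induction r using preA.induct with
  | case1 => intro acc c hc; simp [preA]
  | case2 a =>
      intro acc c hc
      rw [PySem.Int.mod_eq_emod_of_pos (by norm_num)] at hc
      have e0 : ¬ c % 3 = 2 := by omega
      simp [preA, nodesStep, e0]
  | case3 a b =>
      intro acc c hc
      rw [PySem.Int.mod_eq_emod_of_pos (by norm_num)] at hc
      have e0 : ¬ c % 3 = 2 := by omega
      have e1 : ¬ (c + 1) % 3 = 2 := by omega
      simp [preA, nodesStep, e0, e1]
      omega
  | case4 a b cc r ih =>
      intro acc c hc
      rw [PySem.Int.mod_eq_emod_of_pos (by norm_num)] at hc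
      have e3 : PySem.Int.mod (c + 1 + 1 + 1) 3 = 0 := by
        rw [PySem.Int.mod_eq_emod_of_pos (by norm_num)]; omega
      have m0 : ¬ PySem.Int.mod c 3 = 2 := by
        rw [PySem.Int.mod_eq_emod_of_pos (by norm_num)]; omega
      have m1 : ¬ PySem.Int.mod (c + 1) 3 = 2 := by
        rw [PySem.Int.mod_eq_emod_of_pos (by norm_num)]; omega
      have m2 : PySem.Int.mod (c + 1 + 1) 3 = 2 := by
        rw [PySem.Int.mod_eq_emod_of_pos (by norm_num)]; omega
      simp only [List.foldl_cons, nodesStep, if_neg m0, if_neg m1, if_pos m2]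
      rw [ih _ _ e3]
      simp [preA]
      omega

lemma chunks3_ne_nil {α : Type} (r : List α) (h : r ≠ []) : chunks3 r ≠ [] := by
  cases r with
  | nil => exact absurd rfl h
  | cons a r => simp [chunks3]

lemma preA_eq_chunks (r : List Char) :
    preA r = (if r.length % 3 = 0 ∧ r ≠ [] then [','] else [])
      ++ (List.intercalate [','] (chunks3 r)).reverse := by
  induction r using preA.induct with
  | case1 => simp [preA, chunks3, List.intercalate]
  | case2 a => simp [preA, chunks3, List.intercalate]
  | case3 a b => simp [preA, chunks3, List.intercalate]
  | case4 a b c r ih =>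
      by_cases hr : r = []
      · subst hr
        simp [preA, chunks3, List.intercalate]
      · have hc := chunks3_ne_nil r hr
        have hlen : (a :: b :: c :: r).length % 3 = r.length % 3 := by simp; omega
        have hch : chunks3 (a :: b :: c :: r) = [a, b, c] :: chunks3 r := by
          simp [chunks3]
        rw [preA, ih, hch]
        obtain ⟨x, xs, hx⟩ : ∃ x xs, chunks3 r = x :: xs := by
          cases h : chunks3 r with
          | nil => exact absurd h hc
          | cons x xs => exact ⟨x, xs, rfl⟩
        rw [hx]
        have : List.intercalate [','] ([a, b, c] :: x :: xs)
            = [a, b, c] ++ [','] ++ List.intercalate [','] (x :: xs) := by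
          simp [List.intercalate, List.intersperse]
        rw [this]
        simp [hr]
        split <;> simp <;> omega

lemma preA_head_mem (r : List Char) : r ≠ [] → ¬ (r.length % 3 = 0) →
    ∃ x t, preA r = x :: t ∧ x ∈ r := by
  induction r using preA.induct with
  | case1 => intro h _; exact absurd rfl h
  | case2 a => intro _ _; exact ⟨a, [], rfl, by simp⟩
  | case3 a b => intro _ _; exact ⟨b, [a], rfl, by simp⟩
  | case4 a b c r ih =>
      intro _ h3
      have hlen : ¬ (r.length % 3 = 0) := by simp at h3; omega
      have hr : r ≠ [] := by
        intro h; subst h; simp at h3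
      obtain ⟨x, t, hxt, hx⟩ := ih hr hlen
      exact ⟨x, t ++ [',', c, b, a], by rw [preA, hxt]; rfl, by simp [hx]⟩

lemma range_chunks {α : Type} (l : List α) :
    (List.range ((l.length + 2) / 3)).map (fun k => (l.drop (3 * k)).take 3) = chunks3 l := by
  induction l using chunks3.induct with
  | case1 => simp [chunks3]
  | case2 a r ih =>
      have hm : ((a :: r).length + 2) / 3 = ((r.drop 2).length + 2) / 3 + 1 := by
        simp; omega
      rw [hm, List.range_succ_eq_map, List.map_cons, List.map_map]
      have h0 : ((a :: r).drop (3 * 0)).take 3 = a :: r.take 2 := by simp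
      have h1 : ∀ k, ((fun k => ((a :: r).drop (3 * k)).take 3) ∘ Nat.succ) k
          = ((r.drop 2).drop (3 * k)).take 3 := by
        intro k
        simp only [Function.comp_apply]
        have : 3 * Nat.succ k = 3 + 3 * k := by omega
        rw [this, ← List.drop_drop]
        rfl
      rw [h0, List.map_congr_left (fun k _ => h1 k), ih, chunks3]

lemma chunks_eq {α : Type} (r : List α) :
    (PySem.List.pyRange 0 (PySem.List.len r) 3).map
      (fun i => PySem.List.slice r (some i) (some (i + 3))) = chunks3 r := by
  rw [PySem.List.len_eq, PySem.List.pyRange_of_pos _ _ (by norm_num)]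
  have hM : (if (0:Int) < (r.length : Int) then (((r.length : Int) - 0 + 3 - 1) / 3).toNat else 0)
      = (r.length + 2) / 3 := by
    split
    · have h : ((r.length : Int) - 0 + 3 - 1) = ((r.length + 2 : Nat) : Int) := by push_cast; ring
      rw [h, show (((r.length + 2 : Nat) : Int) / 3) = (((r.length + 2) / 3 : Nat) : Int) from
        Eq.symm (Nat.ToInt.div_congr rfl rfl)]
      omega
    · omega
  rw [hM, List.map_map]
  have h1 : ∀ k, ((fun i => PySem.List.slice r (some i) (some (i + 3))) ∘ fun k : Nat => 0 + 3 * (k : Int)) k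
      = (r.drop (3 * k)).take 3 := by
    intro k
    simp only [Function.comp_apply, zero_add]
    rw [PySem.List.slice_toNat r (by positivity) (by positivity)]
    have h1 : ((3:Int) * k).toNat = 3 * k := by omega
    have h2 : ((3:Int) * k + 3).toNat = 3 * k + 3 := by omega
    rw [h1, h2]
    norm_num
  rw [List.map_congr_left (fun k _ => h1 k), range_chunks]

lemma comma_not_mem_toChars (n : Int) : ',' ∉ PySem.Int.toChars n := by
  intro h
  have hd : ∀ m : Nat, ',' ∈ Nat.toDigits 10 m → False := by
    intro m hm
    have := Nat.isDigit_of_mem_toDigits (by norm_num) (by norm_num) hm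
    simp at this
  simp only [PySem.Int.toChars] at h
  split at h
  · rcases List.mem_cons.mp h with h | h
    · exact absurd h (by decide)
    · exact hd _ h
  · exact hd _ h

-- the loop + strip on an arbitrary comma-free reversed digit list equals chunk-and-join
lemma master (r suffix : List Char) (hr : ',' ∉ r) (hs : suffix.head? ≠ some ',') :
    (if ((List.foldl nodesStep (suffix, 0) r).1).head? = some ','
     then ((List.foldl nodesStep (suffix, 0) r).1).drop 1
     else (List.foldl nodesStep (suffix, 0) r).1)
    = (List.intercalate [','] ((PySem.List.pyRange 0 (PySem.List.len r) 3).map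
        (fun i => PySem.List.slice r (some i) (some (i + 3))))).reverse ++ suffix := by
  rw [chunks_eq]
  have hA : (List.foldl nodesStep (suffix, 0) r).1 = preA r ++ suffix := by
    rw [foldl_nodesStep r suffix 0 (by decide)]
  rw [hA]
  by_cases hne : r = []
  · subst hne
    simp [preA, chunks3, List.intercalate]
    exact fun h => absurd h hs
  · by_cases h3 : r.length % 3 = 0
    · have h := preA_eq_chunks r
      rw [if_pos ⟨h3, hne⟩] at h
      rw [h]
      simp
    · obtain ⟨x, t, hxt, hx⟩ := preA_head_mem r hne h3
      have hxc : x ≠ ',' := fun e => hr (e ▸ hx)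
      have h := preA_eq_chunks r
      rw [if_neg (by tauto)] at h
      rw [hxt, List.cons_append]
      rw [if_neg (by simp [hxc])]
      rw [← List.cons_append, ← hxt, h]
      simp

-- ===== VERDICT (by name: the statement is the Claim_ definition above) =====
theorem nodes_text_spec : Claim_equal_nodes_text := by
  intro num _
  unfold Spec_nodes_text nodes_text nodes_text_alt
  have hr : ∀ m : Int, ',' ∉ (PySem.Int.toChars m).reverse :=
    fun m h => comma_not_mem_toChars m (List.mem_reverse.mp h)
  by_cases h1 : num < 10 ^ 5
  · simp only [if_pos h1]
    exact congrArg String.ofList (master _ [] (hr num) (by decide))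
  · by_cases h2 : num < 10 ^ 8
    · have hA2 : 10 ^ 5 ≤ num ∧ num < 10 ^ 8 := ⟨by omega, h2⟩
      simp only [if_neg h1, if_pos hA2, if_pos h2]
      exact congrArg String.ofList (master _ ['k'] (hr _) (by decide))
    · have hA3 : 10 ^ 8 ≤ num := by omega
      simp only [if_neg h1, if_neg (show ¬ (10 ^ 5 ≤ num ∧ num < 10 ^ 8) by tauto),
        if_pos hA3, if_neg h2]
      exact congrArg String.ofList (master _ ['m'] (hr _) (by decide))
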